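-- pv_equiv track=rewrite | github.com/CSLogix/csl-dashboard | csl_bot.py | _resolve_ssl_pg
-- ===== SOURCE A (Python) =====
-- SSL_LINKS = {
--     "maersk":    {"code": "MAERSK",      "url": "https://www.maersk.com/tracking"},
--     "hapag":     {"code": "HAPAG_LLOYD",  "url": "https://www.hapag-lloyd.com/en/online-business/track"},
--     "hapag-lloyd": {"code": "HAPAG_LLOYD","url": "https://www.hapag-lloyd.com/en/online-business/track"},
--     "one line":  {"code": "ONE",          "url": "https://ecomm.one-line.com/one-ecom/manage-shipment/cargo-tracking"},
--     "ocean network": {"code": "ONE",   "url": "https://ecomm.one-line.com/one-ecom/manage-shipment/cargo-tracking"},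
--     "evergreen": {"code": "EVERGREEN",    "url": "https://www.shipmentlink.com/tvs2/jsp/TVS2_498.jsp"},
--     "hmm":       {"code": "HMM",          "url": "https://www.hmm21.com/cms/business/ebiz/trackTrace"},
--     "cma cgm":   {"code": "CMA_CGM",      "url": "https://www.cma-cgm.com/ebusiness/tracking"},
--     "cma":       {"code": "CMA_CGM",      "url": "https://www.cma-cgm.com/ebusiness/tracking"},
--     "apl":       {"code": "CMA_CGM",      "url": "https://www.apl.com/tracking"},
--     "msc":       {"code": "MSC",          "url": "https://www.msc.com/en/track-a-shipment"},
--     "cosco":     {"code": "COSCO",        "url": "https://elines.coscoshipping.com/ebusiness/cargoTracking"},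
--     "zim":       {"code": "ZIM",          "url": "https://www.zim.com/tools/track-a-shipment"},
--     "yang ming": {"code": "YANG_MING",    "url": "https://www.yangming.com/e-service/Track_Trace/track_trace_cargo_tracking.aspx"},
--     "acl":       {"code": "CMA_CGM",      "url": "https://www.aclcargo.com/track-trace/"},
--     "sm line":   {"code": "SM_LINE",      "url": "https://www.smlines.com/smline/CUP_HOM_3000.do"},
--     "sml":       {"code": "SM_LINE",      "url": "https://www.smlines.com/smline/CUP_HOM_3000.do"},
--     "matson":    {"code": "MATSON",        "url": "https://www.matson.com/tracking"},
-- }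
--
-- def _resolve_ssl_pg(vessel, carrier):
--     """Resolve SSL code + URL from vessel/carrier text using hardcoded SSL_LINKS."""
--     for text in (vessel or "", carrier or ""):
--         val = text.strip().lower()
--         if not val:
--             continue
--         # Exact match
--         if val in SSL_LINKS:
--             return SSL_LINKS[val]
--         # Substring match
--         for key, info in SSL_LINKS.items():
--             if key in val:
--                 return info
--         # Word-boundary match
--         for key, info in SSL_LINKS.items():
--             if any(w.startswith(key) for w in val.split()):
--                 return info
--     return None
-- ===== SOURCE B (Python) =====
-- SSL_LINKS = {
--     "maersk":    {"code": "MAERSK",      "url": "https://www.maersk.com/tracking"},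
--     "hapag":     {"code": "HAPAG_LLOYD",  "url": "https://www.hapag-lloyd.com/en/online-business/track"},
--     "hapag-lloyd": {"code": "HAPAG_LLOYD","url": "https://www.hapag-lloyd.com/en/online-business/track"},
--     "one line":  {"code": "ONE",          "url": "https://ecomm.one-line.com/one-ecom/manage-shipment/cargo-tracking"},
--     "ocean network": {"code": "ONE",   "url": "https://ecomm.one-line.com/one-ecom/manage-shipment/cargo-tracking"},
--     "evergreen": {"code": "EVERGREEN",    "url": "https://www.shipmentlink.com/tvs2/jsp/TVS2_498.jsp"},
--     "hmm":       {"code": "HMM",          "url": "https://www.hmm21.com/cms/business/ebiz/trackTrace"},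
--     "cma cgm":   {"code": "CMA_CGM",      "url": "https://www.cma-cgm.com/ebusiness/tracking"},
--     "cma":       {"code": "CMA_CGM",      "url": "https://www.cma-cgm.com/ebusiness/tracking"},
--     "apl":       {"code": "CMA_CGM",      "url": "https://www.apl.com/tracking"},
--     "msc":       {"code": "MSC",          "url": "https://www.msc.com/en/track-a-shipment"},
--     "cosco":     {"code": "COSCO",        "url": "https://elines.coscoshipping.com/ebusiness/cargoTracking"},
--     "zim":       {"code": "ZIM",          "url": "https://www.zim.com/tools/track-a-shipment"},
--     "yang ming": {"code": "YANG_MING",    "url": "https://www.yangming.com/e-service/Track_Trace/track_trace_cargo_tracking.aspx"},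
--     "acl":       {"code": "CMA_CGM",      "url": "https://www.aclcargo.com/track-trace/"},
--     "sm line":   {"code": "SM_LINE",      "url": "https://www.smlines.com/smline/CUP_HOM_3000.do"},
--     "sml":       {"code": "SM_LINE",      "url": "https://www.smlines.com/smline/CUP_HOM_3000.do"},
--     "matson":    {"code": "MATSON",        "url": "https://www.matson.com/tracking"},
-- }
--
-- def _resolve_ssl_pg(vessel, carrier):
--     """Single min-selecting pass per text: priority 0 = exact, 1 = substring, 2 = word-prefix;
--     lower priority wins, dict order breaks ties (first match kept)."""
--     for text in (vessel or "", carrier or ""):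
--         val = text.strip().lower()
--         if not val:
--             continue
--         best = None
--         for key, info in SSL_LINKS.items():
--             if key == val:
--                 p = 0
--             elif key in val:
--                 p = 1
--             elif any(w.startswith(key) for w in val.split()):
--                 p = 2
--             else:
--                 continue
--             if best is None or p < best[0]:
--                 best = (p, info)
--         if best is not None:
--             return best[1]
--     return None
-- ===== Notes on version B (the rewrite author's own statement) =====
-- stated objective: alternative
-- what changed: The three separate short-circuit scans over SSL_LINKS (exact, substring, word-prefix) are collapsed into one min-selecting pass that ranks each key with a priority (0 exact, 1 substring, 2 word-prefix) and keeps the first key of lowest priority.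
import Mathlib
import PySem

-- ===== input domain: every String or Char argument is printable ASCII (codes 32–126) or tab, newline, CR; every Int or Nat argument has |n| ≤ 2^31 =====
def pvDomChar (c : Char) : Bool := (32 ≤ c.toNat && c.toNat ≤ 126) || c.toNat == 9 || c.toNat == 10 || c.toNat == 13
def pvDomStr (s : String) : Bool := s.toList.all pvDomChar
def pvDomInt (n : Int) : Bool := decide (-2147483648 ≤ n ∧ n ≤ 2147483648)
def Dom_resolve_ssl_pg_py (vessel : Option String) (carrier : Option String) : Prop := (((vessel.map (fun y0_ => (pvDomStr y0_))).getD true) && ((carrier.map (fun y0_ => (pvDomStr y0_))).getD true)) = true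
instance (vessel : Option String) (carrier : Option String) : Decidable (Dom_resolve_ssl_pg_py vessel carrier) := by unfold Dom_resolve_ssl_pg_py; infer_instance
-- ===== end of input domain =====

-- B collapses A's three short-circuit scans over SSL_LINKS into one min-selecting pass
-- ranked by priority (0 exact, 1 substring, 2 word-prefix); objective: alternative structure, same cost.

-- ===== PORT A =====

-- the module-level dict SSL_LINKS (dict → association list in insertion order)
def sslLinks : List (String × List (String × String)) := [
  ("maersk",    [("code", "MAERSK"),      ("url", "https://www.maersk.com/tracking")]),
  ("hapag",     [("code", "HAPAG_LLOYD"), ("url", "https://www.hapag-lloyd.com/en/online-business/track")]),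
  ("hapag-lloyd", [("code", "HAPAG_LLOYD"), ("url", "https://www.hapag-lloyd.com/en/online-business/track")]),
  ("one line",  [("code", "ONE"),         ("url", "https://ecomm.one-line.com/one-ecom/manage-shipment/cargo-tracking")]),
  ("ocean network", [("code", "ONE"),     ("url", "https://ecomm.one-line.com/one-ecom/manage-shipment/cargo-tracking")]),
  ("evergreen", [("code", "EVERGREEN"),   ("url", "https://www.shipmentlink.com/tvs2/jsp/TVS2_498.jsp")]),
  ("hmm",       [("code", "HMM"),         ("url", "https://www.hmm21.com/cms/business/ebiz/trackTrace")]),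
  ("cma cgm",   [("code", "CMA_CGM"),     ("url", "https://www.cma-cgm.com/ebusiness/tracking")]),
  ("cma",       [("code", "CMA_CGM"),     ("url", "https://www.cma-cgm.com/ebusiness/tracking")]),
  ("apl",       [("code", "CMA_CGM"),     ("url", "https://www.apl.com/tracking")]),
  ("msc",       [("code", "MSC"),         ("url", "https://www.msc.com/en/track-a-shipment")]),
  ("cosco",     [("code", "COSCO"),       ("url", "https://elines.coscoshipping.com/ebusiness/cargoTracking")]),
  ("zim",       [("code", "ZIM"),         ("url", "https://www.zim.com/tools/track-a-shipment")]),
  ("yang ming", [("code", "YANG_MING"),   ("url", "https://www.yangming.com/e-service/Track_Trace/track_trace_cargo_tracking.aspx")]),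
  ("acl",       [("code", "CMA_CGM"),     ("url", "https://www.aclcargo.com/track-trace/")]),
  ("sm line",   [("code", "SM_LINE"),     ("url", "https://www.smlines.com/smline/CUP_HOM_3000.do")]),
  ("sml",       [("code", "SM_LINE"),     ("url", "https://www.smlines.com/smline/CUP_HOM_3000.do")]),
  ("matson",    [("code", "MATSON"),      ("url", "https://www.matson.com/tracking")])]

-- any(w.startswith(key) for w in val.split())
def wordMatch (key val : String) : Bool :=
  (PySem.Str.split₀ val).any (fun w => PySem.Str.startswith w key)

-- `for key, info in SSL_LINKS.items(): if p(key): return info` (also `val in SSL_LINKS` / `SSL_LINKS[val]`,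
-- which is the same first-match scan over the association list)
def firstMatch (p : String → Bool) : List (String × List (String × String)) → Option (List (String × String))
  | [] => none
  | (k, info) :: rest => if p k then some info else firstMatch p rest

-- the body of A's outer loop for one text, after `val = text.strip().lower()`, val nonempty:
-- exact pass, then substring pass, then word-boundary pass (none ⇒ the loop continues)
def aText (val : String) : Option (List (String × String)) :=
  match firstMatch (fun k => k == val) sslLinks with
  | some info => some info
  | none =>
    match firstMatch (fun k => PySem.Str.isIn k val) sslLinks with
    | some info => some info
    | none => firstMatch (fun k => wordMatch k val) sslLinks

def resolve_ssl_pg_py (vessel : Option String) (carrier : Option String) : Option (List (String × String)) :=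
  -- for text in (vessel or "", carrier or ""): `x or ""` is "" for None and for ""
  let step := fun (text : String) =>
    let val := PySem.Str.lower (PySem.Str.strip text)
    if val = "" then none else aText val
  match step (vessel.getD "") with
  | some info => some info
  | none => step (carrier.getD "")

-- ===== PORT B =====

-- priority of a key against val: 0 exact, 1 substring, 2 word-prefix, none = no match
def prio (key val : String) : Option Nat :=
  if key == val then some 0
  else if PySem.Str.isIn key val then some 1
  else if wordMatch key val then some 2
  else none

-- Source B's inner loop: best = None; for key, info in items: p = prio; if p is not None and (best is None or p < best[0]): best = (p, info)
def bLoop (val : String) (best : Option (Nat × List (String × String))) :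
    List (String × List (String × String)) → Option (Nat × List (String × String))
  | [] => best
  | (k, info) :: rest =>
    match prio k val with
    | none => bLoop val best rest
    | some p =>
      match best with
      | none => bLoop val (some (p, info)) rest
      | some b => if p < b.1 then bLoop val (some (p, info)) rest else bLoop val best rest

-- one text of Source B's outer loop: `best[1] if best is not None else continue`
def bText (val : String) : Option (List (String × String)) :=
  (bLoop val none sslLinks).map Prod.snd

def resolve_ssl_pg_py_alt (vessel : Option String) (carrier : Option String) : Option (List (String × String)) :=
  let step := fun (text : String) =>
    let val := PySem.Str.lower (PySem.Str.strip text)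
    if val = "" then none else bText val
  match step (vessel.getD "") with
  | some info => some info
  | none => step (carrier.getD "")

-- ===== PRECONDITION & SPEC =====
def Spec_resolve_ssl_pg_py (vessel : Option String) (carrier : Option String) (out : Option (List (String × String))) : Prop := out = resolve_ssl_pg_py_alt vessel carrier
instance (vessel : Option String) (carrier : Option String) (out : Option (List (String × String))) : Decidable (Spec_resolve_ssl_pg_py vessel carrier out) := by unfold Spec_resolve_ssl_pg_py; infer_instance

-- ===== CLAIM (what is proved, stated in full; the proofs are below) =====
def Claim_equal_resolve_ssl_pg_py : Prop := ∀ (vessel : Option String) (carrier : Option String), Dom_resolve_ssl_pg_py vessel carrier → Spec_resolve_ssl_pg_py vessel carrier (resolve_ssl_pg_py vessel carrier)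

-- ===== LEMMAS AND PROOFS =====

theorem prio_cases (k val : String) :
    prio k val = none ∨ prio k val = some 0 ∨ prio k val = some 1 ∨ prio k val = some 2 := by
  unfold prio; split_ifs <;> simp

def mrg (b : Nat × List (String × String)) (r : Option (Nat × List (String × String))) :
    Option (Nat × List (String × String)) :=
  match r with
  | none => some b
  | some c => if c.1 < b.1 then some c else some b

theorem bLoop_some (val : String) (xs : List (String × List (String × String)))
    (b : Nat × List (String × String)) :
    bLoop val (some b) xs = mrg b (bLoop val none xs) := by
  induction xs generalizing b with
  | nil => rfl
  | cons kv rest ih =>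
    obtain ⟨k, info⟩ := kv
    cases h : prio k val with
    | none => simp only [bLoop, h]; exact ih b
    | some p =>
      simp only [bLoop, h]
      rw [ih b, ih ⟨p, info⟩]
      cases hr : bLoop val none rest with
      | none =>
        simp [mrg]
      | some c =>
        by_cases h1 : c.1 < p
        · rw [show mrg ⟨p, info⟩ (some c) = some c from by simp [mrg, h1]]
          by_cases h2 : p < b.1
          · simp [mrg, h2, lt_trans h1 h2]
          · simp [mrg, h2]
        · rw [show mrg ⟨p, info⟩ (some c) = some ⟨p, info⟩ from by simp [mrg, h1]]
          by_cases h2 : p < b.1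
          · simp [mrg, h2]
          · have h3 : ¬ c.1 < b.1 := by omega
            simp [mrg, h2, h3]


theorem bLoop_none_spec (val : String) (xs : List (String × List (String × String))) :
    bLoop val none xs =
      match firstMatch (fun k => prio k val == some 0) xs with
      | some info => some (0, info)
      | none =>
        match firstMatch (fun k => prio k val == some 1) xs with
        | some info => some (1, info)
        | none => (firstMatch (fun k => prio k val == some 2) xs).map (fun info => (2, info)) := by
  induction xs with
  | nil => rfl
  | cons kv rest ih =>
    obtain ⟨k, info⟩ := kv
    rcases prio_cases k val with h | h | h | h <;> simp only [bLoop, h, firstMatch]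
    · simpa using ih
    · rw [bLoop_some, ih]
      simp only [show ((some 0 : Option Nat) == some 0) = true from rfl, if_true]
      cases h0 : firstMatch (fun k => prio k val == some 0) rest with
      | some i0 => simp [mrg]
      | none =>
        cases h1 : firstMatch (fun k => prio k val == some 1) rest with
        | some i1 => simp [mrg]
        | none =>
          cases h2 : firstMatch (fun k => prio k val == some 2) rest with
          | some i2 => simp [mrg]
          | none => simp [mrg]
    · rw [bLoop_some, ih]
      simp only [show ((some 1 : Option Nat) == some 0) = false from rfl,
        show ((some 1 : Option Nat) == some 1) = true from rfl, Bool.false_eq_true, if_false, if_true]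
      cases h0 : firstMatch (fun k => prio k val == some 0) rest with
      | some i0 => simp [mrg]
      | none =>
        cases h1 : firstMatch (fun k => prio k val == some 1) rest with
        | some i1 => simp [mrg]
        | none =>
          cases h2 : firstMatch (fun k => prio k val == some 2) rest with
          | some i2 => simp [mrg]
          | none => simp [mrg]
    · rw [bLoop_some, ih]
      simp only [show ((some 2 : Option Nat) == some 0) = false from rfl,
        show ((some 2 : Option Nat) == some 1) = false from rfl,
        show ((some 2 : Option Nat) == some 2) = true from rfl, Bool.false_eq_true, if_false, if_true]
      cases h0 : firstMatch (fun k => prio k val == some 0) rest with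
      | some i0 => simp [mrg]
      | none =>
        cases h1 : firstMatch (fun k => prio k val == some 1) rest with
        | some i1 => simp [mrg]
        | none =>
          cases h2 : firstMatch (fun k => prio k val == some 2) rest with
          | some i2 => simp [mrg]
          | none => simp [mrg]

theorem prio_eq_some_zero (k val : String) : (prio k val == some 0) = (k == val) := by
  unfold prio; split_ifs with h1 h2 h3 <;> simp [h1]

theorem prio_eq_some_one (k val : String) (h0 : (k == val) = false) :
    (prio k val == some 1) = PySem.Str.isIn k val := by
  unfold prio
  simp only [h0, Bool.false_eq_true, if_false]
  cases hi : PySem.Str.isIn k val with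
  | true => rfl
  | false => split_ifs <;> simp_all

theorem prio_eq_some_two (k val : String) (h0 : (k == val) = false)
    (h1 : PySem.Str.isIn k val = false) :
    (prio k val == some 2) = wordMatch k val := by
  unfold prio
  simp only [h0, h1, Bool.false_eq_true, if_false]
  cases hc : wordMatch k val with
  | true => rfl
  | false => rfl

theorem firstMatch_eq_none {p : String → Bool} {xs : List (String × List (String × String))}
    (h : firstMatch p xs = none) : ∀ kv ∈ xs, p kv.1 = false := by
  induction xs with
  | nil => simp
  | cons kv rest ih =>
    obtain ⟨k, info⟩ := kv
    simp only [firstMatch] at h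
    by_cases hk : p k = true
    · simp [hk] at h
    · intro kv hm
      rcases List.mem_cons.mp hm with h1 | h1
      · subst h1; simpa using hk
      · exact ih (by simpa [hk] using h) kv h1

theorem firstMatch_congr {p q : String → Bool} {xs : List (String × List (String × String))}
    (h : ∀ kv ∈ xs, p kv.1 = q kv.1) : firstMatch p xs = firstMatch q xs := by
  induction xs with
  | nil => rfl
  | cons kv rest ih =>
    obtain ⟨k, info⟩ := kv
    have hk := h (k, info) (List.mem_cons_self ..)
    simp only [firstMatch, hk]
    split_ifs with _
    · rfl
    · exact ih fun kv hm => h kv (List.mem_cons_of_mem _ hm)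

-- A's per-text cascade equals B's per-text min-selecting pass
theorem text_eq (val : String) : aText val = bText val := by
  unfold aText bText
  rw [bLoop_none_spec]
  have e0 : firstMatch (fun k => prio k val == some 0) sslLinks
      = firstMatch (fun k => k == val) sslLinks :=
    firstMatch_congr fun kv _ => prio_eq_some_zero kv.1 val
  rw [e0]
  cases h0 : firstMatch (fun k => k == val) sslLinks with
  | some info => simp
  | none =>
    have hall0 := firstMatch_eq_none h0
    have e1 : firstMatch (fun k => prio k val == some 1) sslLinks
        = firstMatch (fun k => PySem.Str.isIn k val) sslLinks :=
      firstMatch_congr fun kv hm => prio_eq_some_one kv.1 val (hall0 kv hm)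
    rw [e1]
    cases h1 : firstMatch (fun k => PySem.Str.isIn k val) sslLinks with
    | some info => simp
    | none =>
      have hall1 := firstMatch_eq_none h1
      have e2 : firstMatch (fun k => prio k val == some 2) sslLinks
          = firstMatch (fun k => wordMatch k val) sslLinks :=
        firstMatch_congr fun kv hm => prio_eq_some_two kv.1 val (hall0 kv hm) (hall1 kv hm)
      rw [e2]
      cases h2 : firstMatch (fun k => wordMatch k val) sslLinks with
      | some info => simp
      | none => simp

-- ===== VERDICT (by name: the statement is the Claim_ definition above) =====
theorem resolve_ssl_pg_py_spec : Claim_equal_resolve_ssl_pg_py := by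
  intro vessel carrier _
  unfold Spec_resolve_ssl_pg_py resolve_ssl_pg_py resolve_ssl_pg_py_alt
  simp only [text_eq]
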